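-- pv_equiv track=rewrite | github.com/matos1396/PS-Einstein | Case-2/Review/questao_1_review.py | questao_1
-- ===== SOURCE A (Python) =====
-- def questao_1(lista_itens, lista_preco, valor):
--
--     total = 0
--     lista_final = []
--
--     lista = list(zip(lista_itens, lista_preco)) # Lista de tuplas com Nome e Preço de cada item
--
--     # Percorre a lista na ordem recebida e compara o preço dos produtos com o valor recebido
--     # Caso seja possível comprar, adiciona o nome do produto na lista dos itens comprados e adiciona o valor do produto ao total
--     # Caso contrário, retorna a lista dos produtos comprados.
--     for elem in lista:
--         total += elem[1]
--         if total <= valor: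
--             lista_final.append(elem[0])
--         else:
--             return lista_final
--
--     return lista_final
-- ===== SOURCE B (Python) =====
-- def questao_1(lista_itens, lista_preco, valor):
--     # Phase 1: running-total table over the prices that have a matching item.
--     prefix = []
--     total = 0
--     for p in lista_preco[:len(lista_itens)]:
--         total += p
--         prefix.append(total)
--     # Phase 2: first index where the running total exceeds the budget.
--     k = next((i for i, t in enumerate(prefix) if t > valor), len(prefix))
--     # Phase 3: the bought names are exactly the first k items.
--     return lista_itens[:k]
-- ===== Notes on version B (the rewrite author's own statement) =====
-- stated objective: alternative
-- what changed: Replaces A's single loop that accumulates and early-returns with three phases: build a prefix-sum table of the prices, find the first index whose running total exceeds the budget, and slice the item names up to that index.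
import Mathlib
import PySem

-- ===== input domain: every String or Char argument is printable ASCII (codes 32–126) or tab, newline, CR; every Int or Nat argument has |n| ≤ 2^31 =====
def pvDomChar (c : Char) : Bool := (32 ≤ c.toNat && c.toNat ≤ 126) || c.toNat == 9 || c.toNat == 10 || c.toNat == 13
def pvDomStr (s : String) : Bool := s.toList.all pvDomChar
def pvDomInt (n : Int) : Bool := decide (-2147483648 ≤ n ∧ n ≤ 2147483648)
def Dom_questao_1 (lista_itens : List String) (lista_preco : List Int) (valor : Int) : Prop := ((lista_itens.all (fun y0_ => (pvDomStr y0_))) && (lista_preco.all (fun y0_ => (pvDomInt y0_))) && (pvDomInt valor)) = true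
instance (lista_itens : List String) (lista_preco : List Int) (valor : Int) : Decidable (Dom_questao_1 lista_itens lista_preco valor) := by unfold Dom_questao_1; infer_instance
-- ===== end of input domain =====

-- ===== PORT A =====
-- loop over zip(lista_itens, lista_preco) carrying the running total; on first overflow return the names collected so far
def questao_1_go (valor : Int) : List (String × Int) → Int → List String
  | [], _ => []
  | (n, p) :: rest, total =>
    let total' := total + p
    if total' ≤ valor then n :: questao_1_go valor rest total' else []

def questao_1 (lista_itens : List String) (lista_preco : List Int) (valor : Int) : List String :=
  questao_1_go valor (List.zip lista_itens lista_preco) 0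

-- ===== PORT B =====
-- B: prefix-sum table, first index over budget, then slice the names.
-- lista_preco[:len(lista_itens)] = List.take (exact: both bounds nonnegative).
def questao_1_alt (lista_itens : List String) (lista_preco : List Int) (valor : Int) : List String :=
  let pref := ((lista_preco.take lista_itens.length).foldl
    (fun (st : Int × List Int) p => (st.1 + p, st.2 ++ [st.1 + p])) (0, [])).2
  let k := ((pref.findIdx? (fun t => decide (valor < t))).getD pref.length)
  lista_itens.take k

-- ===== PRECONDITION & SPEC =====
def Spec_questao_1 (lista_itens : List String) (lista_preco : List Int) (valor : Int) (out : List String) : Prop := out = questao_1_alt lista_itens lista_preco valor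
instance (lista_itens : List String) (lista_preco : List Int) (valor : Int) (out : List String) : Decidable (Spec_questao_1 lista_itens lista_preco valor out) := by unfold Spec_questao_1; infer_instance

-- ===== CLAIM (what is proved, stated in full; the proofs are below) =====
def Claim_equal_questao_1 : Prop := ∀ (lista_itens : List String) (lista_preco : List Int) (valor : Int), Dom_questao_1 lista_itens lista_preco valor → Spec_questao_1 lista_itens lista_preco valor (questao_1 lista_itens lista_preco valor)

-- ===== LEMMAS AND PROOFS =====

-- pure prefix-sum function used to characterise B's foldl
def prefHelper (t : Int) : List Int → List Int
  | [] => []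
  | p :: ps => (t + p) :: prefHelper (t + p) ps

theorem foldl_pref (ps : List Int) (t : Int) (acc : List Int) :
    ps.foldl (fun (st : Int × List Int) p => (st.1 + p, st.2 ++ [st.1 + p])) (t, acc)
      = (t + ps.sum, acc ++ prefHelper t ps) := by
  induction ps generalizing t acc with
  | nil => simp [prefHelper]
  | cons p ps ih => simp [List.foldl, prefHelper, ih]; ring_nf

theorem go_eq_take (valor : Int) (itens : List String) (precos : List Int) (t : Int) :
    questao_1_go valor (List.zip itens precos) t
      = itens.take
        (((prefHelper t (precos.take itens.length)).findIdx? (fun x => decide (valor < x))).getD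
          (prefHelper t (precos.take itens.length)).length) := by
  induction itens generalizing precos t with
  | nil => simp [questao_1_go]
  | cons n ns ih =>
    cases precos with
    | nil => simp [questao_1_go, prefHelper]
    | cons p ps =>
      simp only [List.zip_cons_cons, questao_1_go, List.length_cons, List.take_succ_cons,
        prefHelper, List.findIdx?_cons]
      by_cases h : t + p ≤ valor
      · have hv : ¬ valor < t + p := not_lt.mpr h
        simp only [hv, decide_false, Nat.zero_add, ih ps (t + p), if_pos h]
        cases (prefHelper (t + p) (ps.take ns.length)).findIdx? (fun x => decide (valor < x)) with
        | none => simp [List.take_succ_cons]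
        | some i => simp [List.take_succ_cons]
      · have hv : valor < t + p := not_le.mp h
        simp [hv, h]

-- ===== VERDICT (by name: the statement is the Claim_ definition above) =====
theorem questao_1_spec : Claim_equal_questao_1 := by
  intro itens precos valor _
  show questao_1 itens precos valor = questao_1_alt itens precos valor
  simp only [questao_1, questao_1_alt, foldl_pref, List.nil_append, go_eq_take]
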